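-- pv_equiv track=rewrite | github.com/mbronis/algos | coderbyte.py | CorrectPath
-- ===== SOURCE A (Python) =====
-- from itertools import product
--
-- def CorrectPath(str):
--     moves = {'r':(0,1), 'l':(0,-1), 'd':(1,0), 'u':(-1,0)}
--     moves_inverse = {v: k for k, v in moves.items()}
--
--     path = [moves.get(m, None) for m in list(str)]
--     unknown_moves = [move_no for move_no, move in enumerate(path) if move is None]
--
--     # iterate all permutation on moves in unknown (?) poitions
--     for perutation in product(moves.values(), repeat=len(unknown_moves)):
--         # for each permutation create path
--         for i, move in enumerate(perutation):
--             path[unknown_moves[i]]=move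
--
--         # check path for:
--         # a) in matrix bounds
--         # b) single visit in each cell
--         # c) proper final position
--
--         pos_x, pos_y = 0, 0
--         visited = {(pos_x, pos_y):True}
--
--         for move in path:
--             pos_x += move[0]
--             pos_y += move[1]
--
--             if max(pos_x, pos_y) > 4 or min(pos_x, pos_y) < 0:
--                 break
--
--             if (pos_x, pos_y) in visited:
--                 break
--
--             visited[(pos_x, pos_y)] = True
--         else:
--             if (pos_x, pos_y) == (4,4):
--                 return ''.join([moves_inverse[k] for k in path])
-- ===== SOURCE B (Python) =====
-- def CorrectPath(str):
--     moves = {'r': (0, 1), 'l': (0, -1), 'd': (1, 0), 'u': (-1, 0)}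
--
--     def dfs(i, x, y, visited):
--         if i == len(str):
--             return '' if (x, y) == (4, 4) else None
--         c = str[i]
--         options = [c] if c in moves else ['r', 'l', 'd', 'u']
--         for letter in options:
--             dx, dy = moves[letter]
--             nx, ny = x + dx, y + dy
--             if 0 <= nx <= 4 and 0 <= ny <= 4 and (nx, ny) not in visited:
--                 visited.add((nx, ny))
--                 rest = dfs(i + 1, nx, ny, visited)
--                 visited.discard((nx, ny))
--                 if rest is not None:
--                     return letter + rest
--         return None
--
--     return dfs(0, 0, 0, {(0, 0)})
-- ===== Notes on version B (the rewrite author's own statement) =====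
-- stated objective: faster
-- what changed: A enumerates all 4^k fillings of the unknown moves with itertools.product and simulates the whole path for each; B is a backtracking DFS that walks the path once, choosing moves for unknown positions in the same r,l,d,u order and pruning a branch immediately when it leaves the 5x5 grid or revisits a cell.
import Mathlib
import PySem

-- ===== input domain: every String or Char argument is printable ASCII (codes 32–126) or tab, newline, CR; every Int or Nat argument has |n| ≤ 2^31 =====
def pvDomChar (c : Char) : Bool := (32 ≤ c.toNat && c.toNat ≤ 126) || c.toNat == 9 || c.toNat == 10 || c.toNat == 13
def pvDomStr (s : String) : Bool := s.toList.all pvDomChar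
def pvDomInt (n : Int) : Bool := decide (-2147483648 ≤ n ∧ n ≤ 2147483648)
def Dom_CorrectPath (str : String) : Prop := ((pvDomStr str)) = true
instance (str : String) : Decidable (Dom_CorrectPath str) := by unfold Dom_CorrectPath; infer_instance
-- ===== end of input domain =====

-- B replaces A's exhaustive 4^k itertools.product enumeration by a pruned backtracking DFS
-- over the same move order (faster; a timing run measures the speed-up).
-- B's in-place visited.add/visited.discard backtracking is modelled by passing the extended set.


-- ===== PORT A =====

-- moves = {'r':(0,1), 'l':(0,-1), 'd':(1,0), 'u':(-1,0)}
def pvMovesA : PySem.Dict Char (Int × Int) :=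
  PySem.Dict.ofList [('r', (0, 1)), ('l', (0, -1)), ('d', (1, 0)), ('u', (-1, 0))]

-- moves_inverse = {v: k for k, v in moves.items()}
def pvInvA : PySem.Dict (Int × Int) Char :=
  PySem.Dict.ofList [((0, 1), 'r'), ((0, -1), 'l'), ((1, 0), 'd'), ((-1, 0), 'u')]

-- inner for/else loop: simulate the whole (filled) path; none = break, some = final position.
-- path entries are always `some _` after filling, so the `.getD (0,0)` default is unreachable.
def pvSimA : List (Option (Int × Int)) → Int → Int → PySem.Dict (Int × Int) Bool → Option (Int × Int)
  | [], x, y, _ => some (x, y)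
  | m :: rest, x, y, vis =>
    let mv := m.getD (0, 0)
    let x := x + mv.1
    let y := y + mv.2
    if 4 < max x y ∨ min x y < 0 then none
    else if vis.contains (x, y) then none
    else pvSimA rest x y (vis.insert (x, y) true)

-- itertools.product(moves.values(), repeat=k): first component varies slowest
def pvVals : List (Int × Int) := [(0, 1), (0, -1), (1, 0), (-1, 0)]

def pvProd : Nat → List (List (Int × Int))
  | 0 => [[]]
  | k + 1 => pvVals.flatMap (fun v => (pvProd k).map (fun t => v :: t))

-- outer `for perutation in product(...)` loop.  Python mutates `path` in place, but every
-- iteration overwrites ALL unknown indices, so re-filling the original path each time is exact.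
-- `path[unknown_moves[i]] = move` for i = 0..len(perm)-1 is the fold over unknowns.zip perm
-- (exact: len(perm) == len(unknown_moves), so unknown_moves[i] is defined for every i; the
-- indices come from enumerate, hence are ≥ 0, so `.toNat` is exact).
-- moves_inverse[k] always hits a key after filling, so the `.getD 'r'` default is unreachable.
def pvLoopA (path : List (Option (Int × Int))) (unknowns : List Int) :
    List (List (Int × Int)) → Option String
  | [] => none
  | perm :: rest =>
    let p := (unknowns.zip perm).foldl (fun q iv => q.set iv.1.toNat (some iv.2)) path
    match pvSimA p 0 0 (PySem.Dict.insert PySem.Dict.empty (0, 0) true) with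
    | some pos =>
      if pos = (4, 4) then
        some (String.ofList (p.map (fun k => (pvInvA.get? (k.getD (0, 0))).getD 'r')))
      else pvLoopA path unknowns rest
    | none => pvLoopA path unknowns rest

def CorrectPath (str : String) : Option String :=
  let path := str.toList.map (fun c => pvMovesA.get? c)
  let unknowns := (PySem.List.enumerate path).filterMap
    (fun im => if im.2 = none then some im.1 else none)
  pvLoopA path unknowns (pvProd unknowns.length)

-- ===== PORT B =====

-- moves = {'r':(0,1), 'l':(0,-1), 'd':(1,0), 'u':(-1,0)}  (B's own copy of the dict)
def pvMovesB : PySem.Dict Char (Int × Int) :=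
  PySem.Dict.ofList [('r', (0, 1)), ('l', (0, -1)), ('d', (1, 0)), ('u', (-1, 0))]

-- dfs(i, x, y, visited) over the remaining characters; the `for letter in options` loop is
-- pvTryB.  Every letter tried is a key of moves, so the `.getD (0,0)` default is unreachable.
mutual
def pvDfsB (chars : List Char) (x y : Int) (vis : PySem.Set (Int × Int)) : Option (List Char) :=
  match chars with
  | [] => if x = 4 ∧ y = 4 then some [] else none
  | c :: rest =>
    pvTryB (if pvMovesB.contains c then [c] else ['r', 'l', 'd', 'u']) rest x y vis
termination_by (chars.length, 5)
decreasing_by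
  refine Prod.Lex.right _ ?_
  split <;> simp

def pvTryB (opts : List Char) (rest : List Char) (x y : Int) (vis : PySem.Set (Int × Int)) :
    Option (List Char) :=
  match opts with
  | [] => none
  | letter :: ls =>
    let mv := (pvMovesB.get? letter).getD (0, 0)
    let nx := x + mv.1
    let ny := y + mv.2
    if 0 ≤ nx ∧ nx ≤ 4 ∧ 0 ≤ ny ∧ ny ≤ 4 ∧ ¬(nx, ny) ∈ vis then
      match pvDfsB rest nx ny (PySem.Set.add vis (nx, ny)) with
      | some r => some (letter :: r)
      | none => pvTryB ls rest x y vis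
    else pvTryB ls rest x y vis
termination_by (rest.length + 1, opts.length)
decreasing_by
  · exact Prod.Lex.left _ _ (by simp)
  · exact Prod.Lex.right _ (by simp)
  · exact Prod.Lex.right _ (by simp)
end

def CorrectPath_alt (str : String) : Option String :=
  (pvDfsB str.toList 0 0 (PySem.Set.ofList [((0 : Int), (0 : Int))])).map String.ofList

-- ===== PRECONDITION & SPEC =====
def Spec_CorrectPath (str : String) (out : Option String) : Prop := out = CorrectPath_alt str
instance (str : String) (out : Option String) : Decidable (Spec_CorrectPath str out) := by unfold Spec_CorrectPath; infer_instance

-- ===== CLAIM (what is proved, stated in full; the proofs are below) =====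
def Claim_equal_CorrectPath : Prop := ∀ (str : String), Dom_CorrectPath str → Spec_CorrectPath str (CorrectPath str)

-- ===== LEMMAS AND PROOFS =====

-- Abstract middle layer: both ports are reduced to functions on move lists with a
-- PySem.Set of visited cells, and those are proved equal by induction on the path.

-- the indices of the `None` entries of the path (A's unknown_moves)
def idxA (path : List (Option (Int × Int))) (s : Int) : List Int :=
  (PySem.List.enumerate path s).filterMap (fun im => if im.2 = none then some im.1 else none)

-- fill the `none` slots of the path, in order, with the given moves
def fillM : List (Option (Int × Int)) → List (Int × Int) → List (Int × Int)
  | [], _ => []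
  | some m :: r, p => m :: fillM r p
  | none :: r, v :: p => v :: fillM r p
  | none :: _, [] => []

def simM : List (Int × Int) → Int → Int → PySem.Set (Int × Int) → Option (Int × Int)
  | [], x, y, _ => some (x, y)
  | mv :: rest, x, y, vis =>
    let x := x + mv.1
    let y := y + mv.2
    if 4 < max x y ∨ min x y < 0 then none
    else if (x, y) ∈ vis then none
    else simM rest x y (PySem.Set.add vis (x, y))

def goM (path : List (Option (Int × Int))) (x y : Int) (vis : PySem.Set (Int × Int)) :
    List (List (Int × Int)) → Option (List (Int × Int))
  | [] => none
  | perm :: rest =>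
    if simM (fillM path perm) x y vis = some (4, 4) then some (fillM path perm)
    else goM path x y vis rest

def letterA (mv : Int × Int) : Char := (pvInvA.get? mv).getD 'r'

mutual
def dfsAbs (path : List (Option (Int × Int))) (x y : Int) (vis : PySem.Set (Int × Int)) :
    Option (List (Int × Int)) :=
  match path with
  | [] => if x = 4 ∧ y = 4 then some [] else none
  | some m :: r => tryAbs [m] r x y vis
  | none :: r => tryAbs pvVals r x y vis
termination_by (path.length, 5)
decreasing_by
  · exact Prod.Lex.right _ (by simp)
  · exact Prod.Lex.right _ (by simp [pvVals])

def tryAbs (vs : List (Int × Int)) (r : List (Option (Int × Int))) (x y : Int)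
    (vis : PySem.Set (Int × Int)) : Option (List (Int × Int)) :=
  match vs with
  | [] => none
  | v :: rest =>
    let nx := x + v.1
    let ny := y + v.2
    if 0 ≤ nx ∧ nx ≤ 4 ∧ 0 ≤ ny ∧ ny ≤ 4 ∧ ¬(nx, ny) ∈ vis then
      match dfsAbs r nx ny (PySem.Set.add vis (nx, ny)) with
      | some t => some (v :: t)
      | none => tryAbs rest r x y vis
    else tryAbs rest r x y vis
termination_by (r.length + 1, vs.length)
decreasing_by
  · exact Prod.Lex.left _ _ (by simp)
  · exact Prod.Lex.right _ (by simp)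
  · exact Prod.Lex.right _ (by simp)
end

-- ---- facts about idxA ----

theorem idxA_nil (s : Int) : idxA [] s = [] := rfl

theorem idxA_cons_some (m : Int × Int) (r : List (Option (Int × Int))) (s : Int) :
    idxA (some m :: r) s = idxA r (s + 1) := by
  simp [idxA, PySem.List.enumerate_cons]

theorem idxA_cons_none (r : List (Option (Int × Int))) (s : Int) :
    idxA (none :: r) s = s :: idxA r (s + 1) := by
  simp [idxA, PySem.List.enumerate_cons]

theorem idxA_shift (r : List (Option (Int × Int))) (s : Int) :
    idxA r s = (idxA r 0).map (fun i => s + i) := by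
  induction r generalizing s with
  | nil => simp [idxA_nil]
  | cons a r ih =>
    cases a with
    | some m =>
      rw [idxA_cons_some, idxA_cons_some, ih (s + 1), ih (0 + 1), List.map_map]
      congr 1; funext i; simp; ring
    | none =>
      rw [idxA_cons_none, idxA_cons_none, ih (s + 1), ih (0 + 1), List.map_cons, List.map_map]
      congr 1
      · simp
      · congr 1; funext i; simp; ring

theorem idxA_len_some (m : Int × Int) (r : List (Option (Int × Int))) :
    (idxA (some m :: r) 0).length = (idxA r 0).length := by
  rw [idxA_cons_some, idxA_shift]; simp

theorem idxA_len_none (r : List (Option (Int × Int))) :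
    (idxA (none :: r) 0).length = (idxA r 0).length + 1 := by
  rw [idxA_cons_none, idxA_shift]; simp

-- ---- the fill fold of A equals fillM ----

theorem foldl_set_shift (l : List (Int × (Int × Int))) (a : Option (Int × Int))
    (p : List (Option (Int × Int))) (h : ∀ iv ∈ l, 0 ≤ iv.1) :
    (l.map (Prod.map (fun i => (1 : Int) + i) id)).foldl
        (fun q iv => q.set iv.1.toNat (some iv.2)) (a :: p) =
      a :: l.foldl (fun q iv => q.set iv.1.toNat (some iv.2)) p := by
  induction l generalizing p with
  | nil => rfl
  | cons iv l ih =>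
    have h0 : (0:Int) ≤ iv.1 := h iv (by simp)
    have ht : (1 + iv.1).toNat = iv.1.toNat + 1 := by omega
    simp only [List.map_cons, List.foldl_cons, Prod.map_fst, Prod.map_snd, id_eq, ht,
      List.set_cons_succ]
    exact ih _ (fun x hx => h x (by simp [hx]))

theorem idxA_nonneg (r : List (Option (Int × Int))) (i : Int) (hi : i ∈ idxA r 0) : 0 ≤ i := by
  induction r generalizing i with
  | nil => simp [idxA_nil] at hi
  | cons a r ih =>
    cases a with
    | some m =>
      rw [idxA_cons_some, idxA_shift] at hi
      simp at hi
      obtain ⟨j, hj, rfl⟩ := hi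
      have := ih j hj; omega
    | none =>
      rw [idxA_cons_none, idxA_shift] at hi
      simp at hi
      rcases hi with rfl | ⟨j, hj, rfl⟩
      · omega
      · have := ih j hj; omega

theorem fill_eq (path : List (Option (Int × Int))) (perm : List (Int × Int))
    (h : perm.length = (idxA path 0).length) :
    ((idxA path 0).zip perm).foldl (fun q iv => q.set iv.1.toNat (some iv.2)) path =
      (fillM path perm).map some := by
  induction path generalizing perm with
  | nil => simp [idxA_nil, fillM]
  | cons a r ih =>
    cases a with
    | some m =>
      rw [idxA_cons_some, show (0:Int) + 1 = 1 from rfl, idxA_shift]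
      rw [List.zip_map_left, foldl_set_shift _ _ _ (by
        intro iv hiv
        exact idxA_nonneg r iv.1 (List.of_mem_zip hiv).1)]
      rw [ih perm (by rw [← idxA_len_some m r]; exact h)]
      rfl
    | none =>
      rw [idxA_cons_none, show (0:Int) + 1 = 1 from rfl]
      cases perm with
      | nil =>
        exfalso
        rw [idxA_len_none] at h
        simp at h
      | cons v perm' =>
        rw [idxA_shift, List.zip_cons_cons, List.zip_map_left]
        simp only [List.foldl_cons, Int.toNat_zero, List.set_cons_zero]
        rw [foldl_set_shift _ _ _ (by
          intro iv hiv
          exact idxA_nonneg r iv.1 (List.of_mem_zip hiv).1)]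
        rw [ih perm' (by rw [idxA_len_none] at h; simpa using h)]
        rfl

-- ---- A's simulation over the Dict equals simM over the Set ----

theorem simA_eq (pm : List (Int × Int)) (x y : Int)
    (d : PySem.Dict (Int × Int) Bool) (s : PySem.Set (Int × Int))
    (h : ∀ k, d.contains k = decide (k ∈ s)) :
    pvSimA (pm.map some) x y d = simM pm x y s := by
  induction pm generalizing x y d s with
  | nil => rfl
  | cons mv rest ih =>
    simp only [List.map_cons, pvSimA, simM, Option.getD_some]
    split
    · rfl
    · rw [h]
      by_cases hm : (x + mv.1, y + mv.2) ∈ s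
      · simp [hm]
      · simp only [hm, decide_false, if_false]
        exact ih _ _ _ _ (by
          intro k
          rw [PySem.Dict.contains_insert, h k]
          by_cases hk : k = (x + mv.1, y + mv.2) <;> simp [hk, PySem.Set.mem_add])

-- ---- perms in pvProd have length k ----

theorem pvProd_len (k : Nat) (perm : List (Int × Int)) (h : perm ∈ pvProd k) :
    perm.length = k := by
  induction k generalizing perm with
  | zero => simp [pvProd] at h; simp [h]
  | succ k ih =>
    simp only [pvProd, List.mem_flatMap, List.mem_map] at h
    obtain ⟨a, b, t, ht, rfl⟩ := h
    simp [ih t ht]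

-- ---- A's outer loop equals goM (mapped to strings) ----

theorem loopA_eq (path : List (Option (Int × Int))) (perms : List (List (Int × Int)))
    (hlen : ∀ perm ∈ perms, perm.length = (idxA path 0).length) :
    pvLoopA path (idxA path 0) perms =
      (goM path 0 0 (PySem.Set.ofList [((0 : Int), (0 : Int))]) perms).map
        (fun p => String.ofList (p.map letterA)) := by
  induction perms with
  | nil => rfl
  | cons perm rest ih =>
    simp only [pvLoopA, goM]
    rw [fill_eq path perm (hlen perm (by simp))]
    rw [simA_eq _ 0 0 _ (PySem.Set.ofList [((0 : Int), (0 : Int))]) (by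
      intro k
      by_cases hk : k = ((0 : Int), (0 : Int)) <;>
        simp [hk, PySem.Dict.contains_insert, PySem.Dict.contains_empty, PySem.Set.mem_ofList])]
    cases hsim : simM (fillM path perm) 0 0 (PySem.Set.ofList [((0 : Int), (0 : Int))]) with
    | none => simp [ih (fun q hq => hlen q (by simp [hq]))]
    | some pos =>
      by_cases hp : pos = (4, 4)
      · subst hp
        simp only [if_true, Option.map_some, List.map_map]
        exact congrArg some (congrArg String.ofList
          (List.map_congr_left (fun m _ => by simp [letterA, Function.comp])))
      · simp [hp, ih (fun q hq => hlen q (by simp [hq]))]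

theorem bridgeA (str : String) :
    CorrectPath str =
      (goM (str.toList.map (fun c => pvMovesA.get? c)) 0 0
          (PySem.Set.ofList [((0 : Int), (0 : Int))])
          (pvProd (idxA (str.toList.map (fun c => pvMovesA.get? c)) 0).length)).map
        (fun p => String.ofList (p.map letterA)) := by
  unfold CorrectPath
  exact loopA_eq _ _ (fun perm hp => pvProd_len _ perm hp)

-- ---- B's dfs equals dfsAbs (mapped to letters) ----

theorem movesB_get?_eq (c : Char) : pvMovesB.get? c = pvMovesA.get? c := rfl

theorem movesB_contains_get? (c : Char) :
    pvMovesB.contains c = (pvMovesA.get? c).isSome :=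
  PySem.Dict.contains_eq_isSome_get? pvMovesA c

set_option maxRecDepth 4096 in
theorem letterA_of_get? (c : Char) (m : Int × Int) (h : pvMovesA.get? c = some m) :
    letterA m = c := by
  have hmk : pvMovesA = PySem.Dict.mk
      [('r', (0, 1)), ('l', (0, -1)), ('d', (1, 0)), ('u', (-1, 0))] := by decide
  rw [hmk] at h
  simp only [PySem.Dict.get?_mk_cons] at h
  split_ifs at h with h1 h2 h3 h4
  · have hc : c = 'r' := (eq_of_beq h1).symm
    subst hc; cases h; decide
  · have hc : c = 'l' := (eq_of_beq h2).symm
    subst hc; cases h; decide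
  · have hc : c = 'd' := (eq_of_beq h3).symm
    subst hc; cases h; decide
  · have hc : c = 'u' := (eq_of_beq h4).symm
    subst hc; cases h; decide
  · rw [show (PySem.Dict.mk [] : PySem.Dict Char (Int × Int)) = PySem.Dict.empty from rfl,
      PySem.Dict.get?_empty] at h
    exact absurd h (by simp)

theorem tryB_eq (opts : List Char) (vs : List (Int × Int)) (rest : List Char)
    (x y : Int) (vis : PySem.Set (Int × Int))
    (hc : List.Forall₂ (fun c v => pvMovesA.get? c = some v) opts vs)
    (hrec : ∀ x' y' vis', pvDfsB rest x' y' vis' =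
      (dfsAbs (rest.map (fun c => pvMovesA.get? c)) x' y' vis').map (List.map letterA)) :
    pvTryB opts rest x y vis =
      (tryAbs vs (rest.map (fun c => pvMovesA.get? c)) x y vis).map (List.map letterA) := by
  induction hc with
  | nil => simp [pvTryB, tryAbs]
  | @cons c v opts' vs' hcv _ ih =>
    rw [pvTryB, tryAbs]
    simp only [movesB_get?_eq, hcv, Option.getD_some]
    split
    · rw [hrec]
      cases dfsAbs (rest.map (fun c => pvMovesA.get? c)) (x + v.1) (y + v.2)
          (PySem.Set.add vis (x + v.1, y + v.2)) with
      | none => simpa using ih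
      | some t => simp [letterA_of_get? c v hcv]
    · exact ih

theorem dfsB_eq (chars : List Char) (x y : Int) (vis : PySem.Set (Int × Int)) :
    pvDfsB chars x y vis =
      (dfsAbs (chars.map (fun c => pvMovesA.get? c)) x y vis).map (List.map letterA) := by
  induction chars generalizing x y vis with
  | nil =>
    rw [pvDfsB]
    simp only [List.map_nil]
    rw [dfsAbs]
    split <;> rfl
  | cons c rest ih =>
    rw [pvDfsB]
    cases hc : pvMovesA.get? c with
    | some m =>
      have hcb : pvMovesB.contains c = true := by rw [movesB_contains_get?, hc]; rfl
      rw [if_pos hcb]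
      simp only [List.map_cons, hc, dfsAbs]
      exact tryB_eq [c] [m] rest x y vis (List.Forall₂.cons hc List.Forall₂.nil) ih
    | none =>
      have hcb : pvMovesB.contains c = false := by rw [movesB_contains_get?, hc]; rfl
      rw [if_neg (by simp [hcb])]
      simp only [List.map_cons, hc, dfsAbs]
      refine tryB_eq _ pvVals rest x y vis ?_ ih
      exact List.Forall₂.cons (by decide) (List.Forall₂.cons (by decide)
        (List.Forall₂.cons (by decide) (List.Forall₂.cons (by decide) List.Forall₂.nil)))

theorem bridgeB (str : String) :
    CorrectPath_alt str =
      ((dfsAbs (str.toList.map (fun c => pvMovesA.get? c)) 0 0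
          (PySem.Set.ofList [((0 : Int), (0 : Int))])).map (List.map letterA)).map
        String.ofList := by
  unfold CorrectPath_alt
  rw [dfsB_eq, Option.map_map]

-- ---- the core: first hit of the product enumeration = the DFS ----

theorem bad_iff (nx ny : Int) :
    (4 < max nx ny ∨ min nx ny < 0) ↔ ¬(0 ≤ nx ∧ nx ≤ 4 ∧ 0 ≤ ny ∧ ny ≤ 4) := by
  rw [lt_max_iff, min_lt_iff]; omega

-- A's break conditions as B's positive guard
theorem ite_cond_translate (nx ny : Int) (vis : PySem.Set (Int × Int))
    (X : Option (List (Int × Int))) :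
    (if 4 < max nx ny ∨ min nx ny < 0 then none
     else if (nx, ny) ∈ vis then none else X) =
      (if 0 ≤ nx ∧ nx ≤ 4 ∧ 0 ≤ ny ∧ ny ≤ 4 ∧ ¬(nx, ny) ∈ vis then X else none) := by
  by_cases hb : 4 < max nx ny ∨ min nx ny < 0
  · rw [if_pos hb, if_neg (fun hg => (bad_iff nx ny).mp hb ⟨hg.1, hg.2.1, hg.2.2.1, hg.2.2.2.1⟩)]
  · rw [if_neg hb]
    have h4 : 0 ≤ nx ∧ nx ≤ 4 ∧ 0 ≤ ny ∧ ny ≤ 4 :=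
      not_not.mp (fun hng => hb ((bad_iff nx ny).mpr hng))
    by_cases hm : (nx, ny) ∈ vis
    · rw [if_pos hm, if_neg (fun hg => hg.2.2.2.2 hm)]
    · rw [if_neg hm, if_pos ⟨h4.1, h4.2.1, h4.2.2.1, h4.2.2.2, hm⟩]

theorem goM_append (path : List (Option (Int × Int))) (x y : Int)
    (vis : PySem.Set (Int × Int)) (l₁ l₂ : List (List (Int × Int))) :
    goM path x y vis (l₁ ++ l₂) =
      (goM path x y vis l₁).or (goM path x y vis l₂) := by
  induction l₁ with
  | nil => rfl
  | cons perm rest ih =>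
    simp only [List.cons_append, goM]
    split <;> simp [ih]

-- one step of goM on a path whose head move is forced to `hd`
theorem goM_step (hd : Int × Int) (path : List (Option (Int × Int)))
    (r : List (Option (Int × Int))) (x y : Int) (vis : PySem.Set (Int × Int))
    (perms : List (List (Int × Int)))
    (tail : List (Int × Int) → List (Int × Int))
    (hfill : ∀ perm ∈ perms, fillM path perm = hd :: fillM r (tail perm)) :
    goM path x y vis perms =
      (if 4 < max (x + hd.1) (y + hd.2) ∨ min (x + hd.1) (y + hd.2) < 0 then none
       else if (x + hd.1, y + hd.2) ∈ vis then none
       else (goM r (x + hd.1) (y + hd.2) (PySem.Set.add vis (x + hd.1, y + hd.2))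
          (perms.map tail)).map (fun t => hd :: t)) := by
  induction perms with
  | nil => split <;> (try split) <;> rfl
  | cons perm rest ih =>
    have hrest : ∀ q ∈ rest, fillM path q = hd :: fillM r (tail q) :=
      fun q hq => hfill q (List.mem_cons_of_mem _ hq)
    by_cases hb : 4 < max (x + hd.1) (y + hd.2) ∨ min (x + hd.1) (y + hd.2) < 0
    · rw [if_pos hb]
      simp only [goM]
      have h1 : simM (fillM path perm) x y vis = none := by
        rw [hfill perm List.mem_cons_self]
        simp only [simM]
        rw [if_pos hb]
      rw [h1, if_neg (by simp), ih hrest, if_pos hb]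
    · by_cases hm : (x + hd.1, y + hd.2) ∈ vis
      · rw [if_neg hb, if_pos hm]
        simp only [goM]
        have h1 : simM (fillM path perm) x y vis = none := by
          rw [hfill perm List.mem_cons_self]
          simp only [simM]
          rw [if_neg hb, if_pos hm]
        rw [h1, if_neg (by simp), ih hrest, if_neg hb, if_pos hm]
      · rw [if_neg hb, if_neg hm]
        simp only [goM, List.map_cons]
        have h1 : simM (fillM path perm) x y vis =
            simM (fillM r (tail perm)) (x + hd.1) (y + hd.2)
              (PySem.Set.add vis (x + hd.1, y + hd.2)) := by
          rw [hfill perm List.mem_cons_self]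
          simp only [simM]
          rw [if_neg hb, if_neg hm]
        rw [h1, hfill perm List.mem_cons_self]
        cases hsim : simM (fillM r (tail perm)) (x + hd.1) (y + hd.2)
            (PySem.Set.add vis (x + hd.1, y + hd.2)) with
        | none =>
          rw [if_neg (by simp), ih hrest, if_neg hb, if_neg hm, if_neg (by simp)]
        | some pos =>
          by_cases hp : pos = (4, 4)
          · subst hp
            rw [if_pos rfl]
            rfl
          · rw [if_neg (by simp [hp]), ih hrest, if_neg hb, if_neg hm, if_neg (by simp [hp])]

-- one unfolding of the or-else chain of the DFS
theorem tryAbs_cons (v : Int × Int) (vs : List (Int × Int)) (r : List (Option (Int × Int)))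
    (x y : Int) (vis : PySem.Set (Int × Int)) :
    tryAbs (v :: vs) r x y vis =
      (if 0 ≤ x + v.1 ∧ x + v.1 ≤ 4 ∧ 0 ≤ y + v.2 ∧ y + v.2 ≤ 4 ∧ ¬(x + v.1, y + v.2) ∈ vis then
        ((dfsAbs r (x + v.1) (y + v.2) (PySem.Set.add vis (x + v.1, y + v.2))).map
            (fun t => v :: t)).or (tryAbs vs r x y vis)
       else tryAbs vs r x y vis) := by
  rw [tryAbs]
  split
  · cases h : dfsAbs r (x + v.1) (y + v.2) (PySem.Set.add vis (x + v.1, y + v.2)) <;>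
      simp [Option.or]
  · rfl

theorem or_ite_none (g : Prop) [Decidable g] (X Z : Option (List (Int × Int))) :
    ((if g then X else none).or Z) = if g then X.or Z else Z := by
  split <;> simp

theorem block_eq (r : List (Option (Int × Int))) (x y : Int) (vis : PySem.Set (Int × Int))
    (v : Int × Int)
    (ih : ∀ (x y : Int) (vis : PySem.Set (Int × Int)),
      goM r x y vis (pvProd (idxA r 0).length) = dfsAbs r x y vis) :
    goM (none :: r) x y vis ((pvProd (idxA r 0).length).map (fun t => v :: t)) =
      (if 0 ≤ x + v.1 ∧ x + v.1 ≤ 4 ∧ 0 ≤ y + v.2 ∧ y + v.2 ≤ 4 ∧ ¬(x + v.1, y + v.2) ∈ vis then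
        (dfsAbs r (x + v.1) (y + v.2) (PySem.Set.add vis (x + v.1, y + v.2))).map
          (fun t => v :: t)
       else none) := by
  rw [goM_step v (none :: r) r x y vis _ List.tail (by
    intro perm hp
    obtain ⟨p, _, rfl⟩ := List.mem_map.mp hp
    rfl)]
  rw [List.map_map]
  have hmt : (List.tail ∘ fun t => v :: t) = id := funext fun t => rfl
  rw [hmt, List.map_id, ih, ite_cond_translate]

theorem coreC (path : List (Option (Int × Int))) (x y : Int) (vis : PySem.Set (Int × Int)) :
    goM path x y vis (pvProd (idxA path 0).length) = dfsAbs path x y vis := by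
  induction path generalizing x y vis with
  | nil =>
    rw [dfsAbs]
    simp only [idxA_nil, List.length_nil, pvProd, goM, fillM, simM]
    by_cases h : x = 4 ∧ y = 4
    · obtain ⟨rfl, rfl⟩ := h; simp
    · have hne : ¬((x, y) = ((4 : Int), (4 : Int))) := by
        intro e; exact h ⟨congrArg Prod.fst e, congrArg Prod.snd e⟩
      simp [hne, h]
  | cons a r ih =>
    cases a with
    | some m =>
      rw [idxA_len_some, goM_step m (some m :: r) r x y vis _ id (fun perm _ => rfl),
        List.map_id, ih, ite_cond_translate, dfsAbs, tryAbs]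
      by_cases hg : 0 ≤ x + m.1 ∧ x + m.1 ≤ 4 ∧ 0 ≤ y + m.2 ∧ y + m.2 ≤ 4 ∧
          ¬(x + m.1, y + m.2) ∈ vis
      · rw [if_pos hg, if_pos hg]
        cases hd : dfsAbs r (x + m.1) (y + m.2) (PySem.Set.add vis (x + m.1, y + m.2)) <;>
          simp [tryAbs]
      · rw [if_neg hg, if_neg hg]
        simp [tryAbs]
    | none =>
      rw [idxA_len_none, dfsAbs]
      have hprod : pvProd ((idxA r 0).length + 1) =
          ((pvProd (idxA r 0).length).map (fun t => ((0 : Int), (1 : Int)) :: t)) ++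
          (((pvProd (idxA r 0).length).map (fun t => ((0 : Int), (-1 : Int)) :: t)) ++
          (((pvProd (idxA r 0).length).map (fun t => ((1 : Int), (0 : Int)) :: t)) ++
          ((pvProd (idxA r 0).length).map (fun t => ((-1 : Int), (0 : Int)) :: t)))) := by
        simp [pvProd, pvVals]
      rw [hprod, goM_append, block_eq r x y vis _ ih, goM_append, block_eq r x y vis _ ih,
        goM_append, block_eq r x y vis _ ih, block_eq r x y vis _ ih]
      rw [show pvVals = [((0 : Int), (1 : Int)), (0, -1), (1, 0), (-1, 0)] from rfl]
      rw [tryAbs_cons, tryAbs_cons, tryAbs_cons, tryAbs_cons,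
        show tryAbs [] r x y vis = none from by rw [tryAbs]]
      rw [or_ite_none, or_ite_none, or_ite_none]
      simp

-- ===== VERDICT (by name: the statement is the Claim_ definition above) =====
theorem CorrectPath_spec : Claim_equal_CorrectPath := by
  intro str _
  unfold Spec_CorrectPath
  rw [bridgeA, bridgeB, coreC, Option.map_map]
  rfl
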